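-- pv_equiv track=rewrite | github.com/rupeshkumarp/AI_Unit1_QA1- | ai_files/BFS.py | bfs
-- ===== SOURCE A (Python) =====
-- from collections import deque
--
-- def get_neighbors(state):
--     neighbors = []
--     pegs = list(state)
--
--     for i in range(3):  # from peg i
--         if not pegs[i]:
--             continue
--
--         disk = pegs[i][-1]  # top disk
--
--         for j in range(3):  # to peg j
--             if i == j:
--                 continue
--
--             # Valid move: destination empty OR top disk larger
--             if (not pegs[j]) or pegs[j][-1] > disk:
--                 new_pegs = [list(p) for p in pegs]
--                 new_pegs[i].pop()
--                 new_pegs[j].append(disk)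
--                 neighbors.append(tuple(tuple(p) for p in new_pegs))
--
--     return neighbors
--
-- def bfs(start, goal):
--     queue = deque([(start, [start])])
--     visited = {start}
--
--     while queue:
--         state, path = queue.popleft()
--
--         if state == goal:
--             return path  # full path
--
--         for nxt in get_neighbors(state):
--             if nxt not in visited:
--                 visited.add(nxt)
--                 queue.append((nxt, path + [nxt]))
--
--     return None
-- ===== SOURCE B (Python) =====
-- from collections import deque
--
-- def get_neighbors(state):
--     neighbors = []
--     pegs = list(state)
--
--     for i in range(3):  # from peg i
--         if not pegs[i]:
--             continue
--
--         disk = pegs[i][-1]  # top disk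
--
--         for j in range(3):  # to peg j
--             if i == j:
--                 continue
--
--             # Valid move: destination empty OR top disk larger
--             if (not pegs[j]) or pegs[j][-1] > disk:
--                 new_pegs = [list(p) for p in pegs]
--                 new_pegs[i].pop()
--                 new_pegs[j].append(disk)
--                 neighbors.append(tuple(tuple(p) for p in new_pegs))
--
--     return neighbors
--
-- def bfs(start, goal):
--     # Parent-pointer BFS: the queue holds bare states, each discovered state
--     # records its predecessor (start points to itself); the path is rebuilt
--     # once, when the goal is popped, instead of being copied on every enqueue.
--     parent = {start: start}
--     queue = deque([start])
--     while queue: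
--         state = queue.popleft()
--         if state == goal:
--             chain = [state]
--             while chain[-1] != start:
--                 chain.append(parent[chain[-1]])
--             chain.reverse()
--             return chain
--         for nxt in get_neighbors(state):
--             if nxt not in parent:
--                 parent[nxt] = state
--                 queue.append(nxt)
--     return None
-- ===== Notes on version B (the rewrite author's own statement) =====
-- stated objective: faster
-- what changed: B's BFS queue holds bare states with a parent-pointer dict (also serving as the visited set) and rebuilds the path once when the goal is popped, instead of A's queue of (state, full path copy) pairs that copies the whole path on every enqueue.
import Mathlib
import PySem

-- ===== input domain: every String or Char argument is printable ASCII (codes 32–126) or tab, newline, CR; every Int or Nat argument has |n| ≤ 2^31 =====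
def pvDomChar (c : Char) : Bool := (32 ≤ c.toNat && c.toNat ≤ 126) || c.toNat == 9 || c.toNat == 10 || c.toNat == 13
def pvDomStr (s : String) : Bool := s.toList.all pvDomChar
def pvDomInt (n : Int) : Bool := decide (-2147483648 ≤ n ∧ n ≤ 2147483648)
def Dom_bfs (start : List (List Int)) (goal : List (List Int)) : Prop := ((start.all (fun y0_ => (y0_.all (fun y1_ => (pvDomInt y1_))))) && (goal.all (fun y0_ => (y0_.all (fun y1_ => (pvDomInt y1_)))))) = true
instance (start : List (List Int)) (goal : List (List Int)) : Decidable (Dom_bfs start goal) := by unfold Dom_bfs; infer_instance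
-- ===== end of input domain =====

-- B replaces A's path-copying BFS queue by a parent-pointer dict with one path reconstruction at the goal (alternative; same visit order, no per-enqueue path copies).


-- ===== PORT A =====
-- get_neighbors, shared verbatim by A and B (both Python files contain the same helper).
-- pegs[i]/pegs[j] for i,j in range(3) are ported with pyGetD _ _ []: on states with
-- fewer than 3 pegs Python raises IndexError — those inputs are excluded by Pre_bfs.
def getNeighbors (state : List (List Int)) : List (List (List Int)) :=
  (PySem.List.pyRange 0 3 1).foldl (fun ns i =>
    match (PySem.List.pyGetD state i []).getLast? with
    | none => ns                                  -- if not pegs[i]: continue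
    | some disk =>                                -- disk = pegs[i][-1]
      (PySem.List.pyRange 0 3 1).foldl (fun ns2 j =>
        if i = j then ns2
        else
          let pj := PySem.List.pyGetD state j []
          if pj = [] ∨ disk < pj.getLastD 0 then  -- (not pegs[j]) or pegs[j][-1] > disk
            -- new_pegs = copy; new_pegs[i].pop(); new_pegs[j].append(disk)
            ns2 ++ [state.mapIdx (fun k p =>
              if (k : Int) = i then p.dropLast
              else if (k : Int) = j then p ++ [disk]
              else p)]
          else ns2) ns) []

-- Both while-loops are encoded with explicit fuel; (n+2)!+2 (n = total number of disks)
-- exceeds the number of loop iterations (each iteration pops one of at most 1+#states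
-- enqueued entries, #states ≤ (n+2)!), so the fuel-0 branch is never reached.
def hanoiFuel (start : List (List Int)) : Nat :=
  Nat.factorial ((start.map List.length).sum + 2) + 2

-- the 'while queue:' loop of A: queue of (state, path), visited set
def bfsLoop (goal : List (List Int)) :
    Nat → List ((List (List Int)) × List (List (List Int))) → PySem.Set (List (List Int)) →
    Option (List (List (List Int)))
  | _, [], _ => none
  | 0, _ :: _, _ => none
  | fuel + 1, (state, path) :: rest, visited =>
    if state = goal then some path
    else
      let step := (getNeighbors state).foldl
        (fun acc nxt =>
          if PySem.Set.contains acc.2 nxt then acc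
          else (acc.1 ++ [(nxt, path ++ [nxt])], PySem.Set.add acc.2 nxt))
        (rest, visited)
      bfsLoop goal fuel step.1 step.2

def bfs (start : List (List Int)) (goal : List (List Int)) : Option (List (List (List Int))) :=
  bfsLoop goal (hanoiFuel start) [(start, [start])] (PySem.Set.ofList [start])

-- ===== PORT B =====
-- 'chain = [state]; while chain[-1] != start: chain.append(parent[chain[-1]]); chain.reverse()'
-- ported with a front accumulator (the reversed chain is built directly); fuel = size+1
-- bounds the chain length, parent.get? none is Python's (unreachable) KeyError.
def reconAux (parent : PySem.Dict (List (List Int)) (List (List Int))) (start : List (List Int)) :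
    Nat → List (List Int) → List (List (List Int)) → Option (List (List (List Int)))
  | 0, _, _ => none
  | fuel + 1, cur, acc =>
    if cur = start then some (cur :: acc)
    else
      match parent.get? cur with
      | none => none
      | some p => reconAux parent start fuel p (cur :: acc)

-- the 'while queue:' loop of B: queue of bare states, parent dict doubles as visited
def bfsAltLoop (start goal : List (List Int)) :
    Nat → List (List (List Int)) → PySem.Dict (List (List Int)) (List (List Int)) →
    Option (List (List (List Int)))
  | _, [], _ => none
  | 0, _ :: _, _ => none
  | fuel + 1, state :: rest, parent =>
    if state = goal then reconAux parent start (parent.size + 1) state []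
    else
      let step := (getNeighbors state).foldl
        (fun acc nxt =>
          if PySem.Dict.contains acc.2 nxt then acc
          else (acc.1 ++ [nxt], PySem.Dict.insert acc.2 nxt state))
        (rest, parent)
      bfsAltLoop start goal fuel step.1 step.2

def bfs_alt (start : List (List Int)) (goal : List (List Int)) : Option (List (List (List Int))) :=
  bfsAltLoop start goal (hanoiFuel start) [start]
    (PySem.Dict.insert PySem.Dict.empty start start)

-- ===== PRECONDITION & SPEC =====
-- Pre_ excludes exactly the inputs where Python A raises: if start ≠ goal and start has
-- fewer than 3 pegs, get_neighbors(start) raises IndexError (B raises there too).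
def Pre_bfs (start : List (List Int)) (goal : List (List Int)) : Prop :=
  start = goal ∨ 3 ≤ start.length
instance (start : List (List Int)) (goal : List (List Int)) : Decidable (Pre_bfs start goal) := by unfold Pre_bfs; infer_instance

def pvWitness_bfs : List (List Int) × List (List Int) := ([[2, 1], [], []], [[], [], [2, 1]])

def Spec_bfs (start : List (List Int)) (goal : List (List Int)) (out : Option (List (List (List Int)))) : Prop := out = bfs_alt start goal
instance (start : List (List Int)) (goal : List (List Int)) (out : Option (List (List (List Int)))) : Decidable (Spec_bfs start goal out) := by unfold Spec_bfs; infer_instance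

-- ===== CLAIM (what is proved, stated in full; the proofs are below) =====
def Claim_equal_bfs : Prop := ∀ (start : List (List Int)) (goal : List (List Int)), Dom_bfs start goal → Pre_bfs start goal → Spec_bfs start goal (bfs start goal)

-- ===== LEMMAS AND PROOFS =====

-- reconAux with an accumulator is reconAux with [] followed by appending the accumulator
theorem reconAux_acc (parent : PySem.Dict (List (List Int)) (List (List Int)))
    (start : List (List Int)) :
    ∀ (fuel : Nat) (cur : List (List Int)) (acc : List (List (List Int))),
      reconAux parent start fuel cur acc
        = (reconAux parent start fuel cur []).map (· ++ acc) := by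
  intro fuel
  induction fuel with
  | zero => intro cur acc; simp [reconAux]
  | succ f ih =>
    intro cur acc
    by_cases h : cur = start
    · simp [reconAux, h]
    · simp only [reconAux, if_neg h]
      cases hp : parent.get? cur with
      | none => simp
      | some p =>
        show reconAux parent start f p (cur :: acc)
            = (reconAux parent start f p [cur]).map (· ++ acc)
        rw [ih p (cur :: acc), ih p [cur]]
        cases reconAux parent start f p [] <;> simp

-- success of reconAux is monotone in fuel
theorem reconAux_mono (parent : PySem.Dict (List (List Int)) (List (List Int)))
    (start : List (List Int)) :
    ∀ (fuel fuel' : Nat), fuel ≤ fuel' →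
      ∀ (cur : List (List Int)) (acc l : List (List (List Int))),
        reconAux parent start fuel cur acc = some l →
        reconAux parent start fuel' cur acc = some l := by
  intro fuel
  induction fuel with
  | zero => intro f' _ cur acc l h; simp [reconAux] at h
  | succ f ih =>
    intro f' hle cur acc l h
    obtain ⟨f'', rfl⟩ : ∃ f'', f' = f'' + 1 := ⟨f' - 1, by omega⟩
    by_cases hc : cur = start
    · simpa [reconAux, hc] using h
    · simp only [reconAux, if_neg hc] at h ⊢
      cases hp : parent.get? cur with
      | none => rw [hp] at h; exact absurd h (by simp)
      | some p =>
        rw [hp] at h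
        exact ih f'' (by omega) p (cur :: acc) l h

-- a successful reconAux is unchanged by inserting a fresh key
theorem reconAux_insert (parent : PySem.Dict (List (List Int)) (List (List Int)))
    (start nxt v : List (List Int)) (hfresh : parent.get? nxt = none) :
    ∀ (fuel : Nat) (cur : List (List Int)) (acc l : List (List (List Int))),
      reconAux parent start fuel cur acc = some l →
      reconAux (parent.insert nxt v) start fuel cur acc = some l := by
  intro fuel
  induction fuel with
  | zero => intro cur acc l h; simp [reconAux] at h
  | succ f ih =>
    intro cur acc l h
    by_cases hc : cur = start
    · simpa [reconAux, hc] using h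
    · simp only [reconAux, if_neg hc] at h ⊢
      cases hp : parent.get? cur with
      | none => rw [hp] at h; exact absurd h (by simp)
      | some p =>
        rw [hp] at h
        have hne : cur ≠ nxt := by
          intro e; rw [e, hfresh] at hp; simp at hp
        rw [PySem.Dict.get?_insert_of_ne parent v hne, hp]
        exact ih p (cur :: acc) l h

-- "the parent chain of s reconstructs exactly p"
def Recon (parent : PySem.Dict (List (List Int)) (List (List Int)))
    (start s : List (List Int)) (p : List (List (List Int))) : Prop :=
  reconAux parent start (parent.size + 1) s [] = some p

theorem get?_none_of_contains_false (parent : PySem.Dict (List (List Int)) (List (List Int)))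
    (nxt : List (List Int)) (hfresh : parent.contains nxt = false) :
    parent.get? nxt = none := by
  have hi := PySem.Dict.contains_eq_isSome_get? parent nxt
  rw [hfresh] at hi
  cases hg : parent.get? nxt with
  | none => rfl
  | some w => rw [hg] at hi; simp at hi

theorem recon_insert_fresh (parent : PySem.Dict (List (List Int)) (List (List Int)))
    (start s nxt v : List (List Int)) (p : List (List (List Int)))
    (hfresh : parent.contains nxt = false) (h : Recon parent start s p) :
    Recon (parent.insert nxt v) start s p := by
  have hfresh' := get?_none_of_contains_false parent nxt hfresh
  have hsize : (parent.insert nxt v).size = parent.size + 1 := by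
    rw [PySem.Dict.size_insert, hfresh]; simp
  unfold Recon at h ⊢
  rw [hsize]
  exact reconAux_mono _ _ (parent.size + 1) (parent.size + 1 + 1) (by omega) s [] p
    (reconAux_insert parent start nxt v hfresh' _ s [] p h)

theorem recon_new_entry (parent : PySem.Dict (List (List Int)) (List (List Int)))
    (start state nxt : List (List Int)) (path : List (List (List Int)))
    (hfresh : parent.contains nxt = false) (hstart : parent.contains start = true)
    (h : Recon parent start state path) :
    Recon (parent.insert nxt state) start nxt (path ++ [nxt]) := by
  have hfresh' := get?_none_of_contains_false parent nxt hfresh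
  have hne : nxt ≠ start := by
    intro e; rw [e, hstart] at hfresh; exact Bool.noConfusion hfresh
  have hsize : (parent.insert nxt state).size = parent.size + 1 := by
    rw [PySem.Dict.size_insert, hfresh]; simp
  unfold Recon
  rw [hsize]
  rw [show reconAux (parent.insert nxt state) start (parent.size + 1 + 1) nxt []
      = if nxt = start then some [nxt] else
          match (parent.insert nxt state).get? nxt with
          | none => none
          | some p => reconAux (parent.insert nxt state) start (parent.size + 1) p [nxt]
      from rfl]
  rw [if_neg hne, PySem.Dict.get?_insert_self]
  show reconAux (parent.insert nxt state) start (parent.size + 1) state [nxt]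
      = some (path ++ [nxt])
  rw [reconAux_acc,
    reconAux_insert parent start nxt state hfresh' _ state [] path h]
  rfl

theorem set_contains_add (s : PySem.Set (List (List Int))) (x y : List (List Int)) :
    PySem.Set.contains (PySem.Set.add s x) y = (PySem.Set.contains s y || (y == x)) := by
  rw [Bool.eq_iff_iff]
  simp [PySem.Set.contains, PySem.Set.mem_add, or_comm]

-- the inner for-loops of A and B preserve the simulation invariant
theorem fold_inv (start state : List (List Int)) (path : List (List (List Int)))
    (ns : List (List (List Int))) :
    ∀ (qA : List ((List (List Int)) × List (List (List Int))))
      (visited : PySem.Set (List (List Int)))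
      (parent : PySem.Dict (List (List Int)) (List (List Int))),
      (∀ x, PySem.Set.contains visited x = parent.contains x) →
      parent.contains start = true →
      Recon parent start state path →
      (∀ sp ∈ qA, Recon parent start sp.1 sp.2) →
      let rA := ns.foldl (fun acc nxt =>
          if PySem.Set.contains acc.2 nxt then acc
          else (acc.1 ++ [(nxt, path ++ [nxt])], PySem.Set.add acc.2 nxt)) (qA, visited)
      let rB := ns.foldl (fun acc nxt =>
          if PySem.Dict.contains acc.2 nxt then acc
          else (acc.1 ++ [nxt], PySem.Dict.insert acc.2 nxt state)) (qA.map Prod.fst, parent)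
      rB.1 = rA.1.map Prod.fst ∧
      (∀ x, PySem.Set.contains rA.2 x = rB.2.contains x) ∧
      rB.2.contains start = true ∧
      (∀ sp ∈ rA.1, Recon rB.2 start sp.1 sp.2) := by
  induction ns with
  | nil =>
    intro qA visited parent hcont hstart _hrec hq
    exact ⟨rfl, hcont, hstart, hq⟩
  | cons n ns ih =>
    intro qA visited parent hcont hstart hrec hq
    simp only [List.foldl_cons]
    rw [hcont n]
    by_cases hn : parent.contains n = true
    · rw [if_pos hn, if_pos hn]
      exact ih qA visited parent hcont hstart hrec hq
    · have hn' : parent.contains n = false := by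
        cases hb : parent.contains n
        · rfl
        · exact absurd hb hn
      rw [if_neg (by simp [hn']), if_neg (by simp [hn'])]
      have hcont' : ∀ x, PySem.Set.contains (PySem.Set.add visited n) x
          = (parent.insert n state).contains x := by
        intro x
        rw [set_contains_add, hcont x, PySem.Dict.contains_insert, Bool.or_comm]
      have hstart' : (parent.insert n state).contains start = true := by
        rw [PySem.Dict.contains_insert, hstart]; simp
      have hrec' : Recon (parent.insert n state) start state path :=
        recon_insert_fresh parent start state n state path hn' hrec
      have hq' : ∀ sp ∈ qA ++ [(n, path ++ [n])],
          Recon (parent.insert n state) start sp.1 sp.2 := by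
        intro sp hsp
        rcases List.mem_append.mp hsp with hin | hlast
        · exact recon_insert_fresh parent start sp.1 n state sp.2 hn' (hq sp hin)
        · have : sp = (n, path ++ [n]) := by simpa using hlast
          subst this
          exact recon_new_entry parent start state n path hn' hstart hrec
      have hmap : (qA ++ [(n, path ++ [n])]).map Prod.fst = qA.map Prod.fst ++ [n] := by
        simp
      rw [← hmap]
      exact ih (qA ++ [(n, path ++ [n])]) (PySem.Set.add visited n)
        (parent.insert n state) hcont' hstart' hrec' hq'

-- lockstep simulation of the two while-loops
theorem loop_eq (start goal : List (List Int)) :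
    ∀ (fuel : Nat) (qA : List ((List (List Int)) × List (List (List Int))))
      (visited : PySem.Set (List (List Int)))
      (parent : PySem.Dict (List (List Int)) (List (List Int))),
      (∀ x, PySem.Set.contains visited x = parent.contains x) →
      parent.contains start = true →
      (∀ sp ∈ qA, Recon parent start sp.1 sp.2) →
      bfsLoop goal fuel qA visited = bfsAltLoop start goal fuel (qA.map Prod.fst) parent := by
  intro fuel
  induction fuel with
  | zero =>
    intro qA visited parent _ _ _
    cases qA with
    | nil => simp [bfsLoop, bfsAltLoop]
    | cons hd tl => cases hd; simp [bfsLoop, bfsAltLoop]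
  | succ f ih =>
    intro qA visited parent hcont hstart hq
    cases qA with
    | nil => simp [bfsLoop, bfsAltLoop]
    | cons hd rest =>
      cases hd with
      | mk state path =>
        simp only [List.map_cons]
        by_cases hg : state = goal
        · simp only [bfsLoop, bfsAltLoop, if_pos hg]
          exact (hq (state, path) List.mem_cons_self).symm
        · simp only [bfsLoop, bfsAltLoop, if_neg hg]
          have hf := fold_inv start state path (getNeighbors state) rest visited parent
            hcont hstart (hq (state, path) List.mem_cons_self)
            (fun sp hsp => hq sp (List.mem_cons_of_mem _ hsp))
          simp only at hf
          obtain ⟨h1, h2, h3, h4⟩ := hf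
          rw [h1]
          exact ih _ _ _ h2 h3 h4

-- ===== VERDICT (by name: the statement is the Claim_ definition above) =====
theorem bfs_spec : Claim_equal_bfs := by
  intro start goal _hdom _hpre
  unfold Spec_bfs bfs bfs_alt
  have hcont : ∀ x, PySem.Set.contains (PySem.Set.ofList [start]) x
      = (PySem.Dict.insert PySem.Dict.empty start start).contains x := by
    intro x
    rw [PySem.Dict.contains_insert, PySem.Dict.contains_empty]
    show PySem.Set.contains (PySem.Set.add PySem.Set.empty start) x = (x == start || false)
    rw [set_contains_add]
    show (false || (x == start)) = (x == start || false)
    simp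
  have hstart : (PySem.Dict.insert PySem.Dict.empty start start).contains start = true := by
    rw [PySem.Dict.contains_insert]; simp
  have hrec : ∀ sp ∈ [(start, [start])],
      Recon (PySem.Dict.insert PySem.Dict.empty start start) start sp.1 sp.2 := by
    intro sp hsp
    have : sp = (start, [start]) := by simpa using hsp
    subst this
    unfold Recon
    have hsize : (PySem.Dict.insert PySem.Dict.empty start start).size = 1 := by
      rw [PySem.Dict.size_insert, PySem.Dict.contains_empty]
      simp [PySem.Dict.size_empty]
    rw [hsize]
    simp [reconAux]
  have := loop_eq start goal (hanoiFuel start) [(start, [start])]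
    (PySem.Set.ofList [start]) (PySem.Dict.insert PySem.Dict.empty start start)
    hcont hstart hrec
  simpa using this
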